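-- pv_equiv track=rewrite | github.com/Trummler12/Schoolsystem2 | backend/src/main/resources/scripts/topics/restructure_disciplines_csv.py | reorder_top_level_groups
-- ===== SOURCE A (Python) =====
-- def collect_subtree(rows, prefix):
--     subtree = []
--     rest = []
--     for row in rows:
--         if row["key"] == prefix or row["key"].startswith(prefix + "."):
--             subtree.append(row)
--         else:
--             rest.append(row)
--     if subtree:
--         root = [row for row in subtree if row["key"] == prefix]
--         others = [row for row in subtree if row["key"] != prefix]
--         subtree = root + others
--     return subtree, rest
--
-- def reorder_top_level_groups(rows):
--     order = ["humanities", "social-science", "formal-science", "natural-science"]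
--     remaining = rows[:]
--     ordered = []
--     for prefix in order:
--         subtree, remaining = collect_subtree(remaining, prefix)
--         ordered.extend(subtree)
--     ordered.extend(remaining)
--     return ordered
-- ===== SOURCE B (Python) =====
-- def reorder_top_level_groups(rows):
--     # Stateless re-decomposition: instead of repeatedly partitioning a shrinking
--     # "remaining" list, filter the original list once per bucket; the four
--     # top-level prefixes are mutually disjoint, so each row lands in one bucket.
--     order = ["humanities", "social-science", "formal-science", "natural-science"]
--     out = []
--     for p in order:
--         out += [r for r in rows if r["key"] == p]
--         out += [r for r in rows if r["key"].startswith(p + ".")]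
--     out += [r for r in rows
--             if not any(r["key"] == p or r["key"].startswith(p + ".") for p in order)]
--     return out
-- ===== Notes on version B (the rewrite author's own statement) =====
-- stated objective: simpler
-- what changed: B drops the stateful shrinking 'remaining' list and the two-phase root/others reshuffle: it builds the output directly from independent filters of the original list (exact-key bucket, then dotted-subkey bucket, per prefix, then the unmatched rest), which is correct because the four top-level prefixes are mutually disjoint.
import Mathlib
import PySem

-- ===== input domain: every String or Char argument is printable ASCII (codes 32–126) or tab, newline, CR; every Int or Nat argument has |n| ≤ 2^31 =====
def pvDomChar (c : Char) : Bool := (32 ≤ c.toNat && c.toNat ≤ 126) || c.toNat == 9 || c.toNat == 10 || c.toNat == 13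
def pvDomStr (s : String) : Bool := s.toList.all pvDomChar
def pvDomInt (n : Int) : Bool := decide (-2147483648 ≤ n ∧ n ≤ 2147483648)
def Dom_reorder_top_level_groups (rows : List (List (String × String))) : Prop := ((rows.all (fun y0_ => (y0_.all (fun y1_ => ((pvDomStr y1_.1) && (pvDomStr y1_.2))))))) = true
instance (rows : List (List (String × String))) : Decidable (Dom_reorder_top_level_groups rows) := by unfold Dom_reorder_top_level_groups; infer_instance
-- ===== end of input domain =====

-- B replaces A's stateful repeated partitioning of a shrinking "remaining" list by
-- independent filters of the original list per (disjoint) prefix bucket: simpler decomposition, same cost.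


-- ===== PORT A =====
-- row["key"]: dict lookup (KeyError = none, excluded by Pre_)
def pvKeyA (row : List (String × String)) : String :=
  ((PySem.Dict.ofList row).get? "key").getD ""

def collect_subtree (rows : List (List (String × String))) (pre : String) :
    List (List (String × String)) × List (List (String × String)) :=
  let p := rows.foldl (fun (acc : List (List (String × String)) × List (List (String × String))) row =>
      if pvKeyA row == pre || PySem.Str.startswith (pvKeyA row) (pre ++ ".")
      then (acc.1 ++ [row], acc.2) else (acc.1, acc.2 ++ [row])) ([], [])
  let subtree := p.1
  let rest := p.2
  let subtree :=
    if subtree ≠ [] then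
      (subtree.filter (fun r => pvKeyA r == pre)) ++ (subtree.filter (fun r => !(pvKeyA r == pre)))
    else subtree
  (subtree, rest)

def reorder_top_level_groups (rows : List (List (String × String))) : List (List (String × String)) :=
  let order := ["humanities", "social-science", "formal-science", "natural-science"]
  let res := order.foldl (fun (acc : List (List (String × String)) × List (List (String × String))) pre =>
      let sr := collect_subtree acc.2 pre
      (acc.1 ++ sr.1, sr.2)) (([] : List (List (String × String))), rows)
  res.1 ++ res.2

-- ===== PORT B =====
-- (B reads row["key"] the same way; the shared helper pvKeyA is reused)
def reorder_top_level_groups_alt (rows : List (List (String × String))) : List (List (String × String)) :=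
  let order := ["humanities", "social-science", "formal-science", "natural-science"]
  let out := order.foldl (fun (out : List (List (String × String))) p =>
      out ++ rows.filter (fun r => pvKeyA r == p)
          ++ rows.filter (fun r => PySem.Str.startswith (pvKeyA r) (p ++ "."))) []
  out ++ rows.filter (fun r =>
      !(order.any (fun p => pvKeyA r == p || PySem.Str.startswith (pvKeyA r) (p ++ "."))))

-- ===== PRECONDITION & SPEC =====
-- Pre_ excludes exactly the inputs on which Python A raises KeyError: a row-dict without a "key" entry.
def Pre_reorder_top_level_groups (rows : List (List (String × String))) : Prop :=
  ∀ r ∈ rows, ((PySem.Dict.ofList r).get? "key").isSome = true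
instance (rows : List (List (String × String))) : Decidable (Pre_reorder_top_level_groups rows) := by
  unfold Pre_reorder_top_level_groups; infer_instance

def pvWitness_reorder_top_level_groups : (List (List (String × String))) :=
  [[("key", "humanities.art"), ("id", "1")], [("key", "math")]]

def Spec_reorder_top_level_groups (rows : List (List (String × String))) (out : List (List (String × String))) : Prop := out = reorder_top_level_groups_alt rows
instance (rows : List (List (String × String))) (out : List (List (String × String))) : Decidable (Spec_reorder_top_level_groups rows out) := by unfold Spec_reorder_top_level_groups; infer_instance

-- ===== CLAIM (what is proved, stated in full; the proofs are below) =====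
def Claim_equal_reorder_top_level_groups : Prop := ∀ (rows : List (List (String × String))), Dom_reorder_top_level_groups rows → Pre_reorder_top_level_groups rows → Spec_reorder_top_level_groups rows (reorder_top_level_groups rows)

-- ===== LEMMAS AND PROOFS =====

-- the combined membership test of A's first partition, as a predicate on the key string
def pvM (p s : String) : Bool := s == p || PySem.Str.startswith s (p ++ ".")

theorem pv_foldl_partition (pre : String) (rows : List (List (String × String)))
    (a b : List (List (String × String))) :
    rows.foldl (fun (acc : List (List (String × String)) × List (List (String × String))) row =>
      if pvKeyA row == pre || PySem.Str.startswith (pvKeyA row) (pre ++ ".")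
      then (acc.1 ++ [row], acc.2) else (acc.1, acc.2 ++ [row])) (a, b)
    = (a ++ rows.filter (fun r => pvM pre (pvKeyA r)),
       b ++ rows.filter (fun r => !pvM pre (pvKeyA r))) := by
  induction rows generalizing a b with
  | nil => simp
  | cons x xs ih =>
    simp only [List.foldl_cons, List.filter_cons, pvM]
    cases h : (pvKeyA x == pre || PySem.Str.startswith (pvKeyA x) (pre ++ ".")) with
    | true =>
      simp only [Bool.not_true]
      simp only [Bool.false_eq_true, if_true, if_false]
      rw [ih, List.append_assoc, List.singleton_append]
      rfl
    | false =>
      simp only [Bool.not_false]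
      simp only [Bool.false_eq_true, if_true, if_false]
      rw [ih, List.append_assoc, List.singleton_append]
      rfl

-- disjointness of the prefix tests, at the level of one key string
theorem pv_sw_iff (t u : String) :
    PySem.Str.startswith t (u ++ ".") = true ↔ (u.toList ++ ['.']) <+: t.toList := by
  rw [PySem.Str.startswith_eq, PySem.Chars.startswith_iff]
  simp

theorem pv_disj (p q s : String) (h1 : (q == p) = false)
    (h2 : PySem.Str.startswith q (p ++ ".") = false)
    (h3 : PySem.Str.startswith p (q ++ ".") = false)
    (h4 : ¬ (p.toList ++ ['.']) <+: (q.toList ++ ['.']))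
    (h5 : ¬ (q.toList ++ ['.']) <+: (p.toList ++ ['.'])) :
    pvM q s = true → pvM p s = false := by
  intro hq
  unfold pvM at hq ⊢
  rcases Bool.or_eq_true_iff.mp hq with he | hs
  · have hsq : s = q := by simpa using he
    subst hsq
    exact Bool.or_eq_false_iff.mpr ⟨h1, h2⟩
  · have hpref : (q.toList ++ ['.']) <+: s.toList := (pv_sw_iff s q).mp hs
    apply Bool.or_eq_false_iff.mpr
    constructor
    · cases hsp : (s == p) with
      | false => rfl
      | true =>
        have : s = p := by simpa using hsp
        subst this
        rw [h3] at hs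
        exact absurd hs (by simp)
    · cases hsw : PySem.Str.startswith s (p ++ ".") with
      | false => rfl
      | true =>
        have hpref2 : (p.toList ++ ['.']) <+: s.toList := (pv_sw_iff s p).mp hsw
        rcases List.prefix_or_prefix_of_prefix hpref2 hpref with h | h
        · exact absurd h h4
        · exact absurd h h5

-- filtering rows that survive an earlier disjoint test is filtering the original list
theorem pv_filter_skip (rows : List (List (String × String))) (t u : String → Bool)
    (h : ∀ s, t s = true → u s = false) :
    (rows.filter (fun r => !u (pvKeyA r))).filter (fun r => t (pvKeyA r))
      = rows.filter (fun r => t (pvKeyA r)) := by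
  induction rows with
  | nil => rfl
  | cons x xs ih =>
    by_cases ht : t (pvKeyA x) = true
    · have hu := h _ ht
      simp [hu, ht, ih]
    · simp only [Bool.not_eq_true] at ht
      by_cases hu : u (pvKeyA x) = true <;> simp [hu, ht, ih]

-- A's collect_subtree, characterised by filters of its input
theorem pv_collect (pre : String) (rows : List (List (String × String)))
    (hself : PySem.Str.startswith pre (pre ++ ".") = false) :
    collect_subtree rows pre =
      (rows.filter (fun r => pvKeyA r == pre)
        ++ rows.filter (fun r => PySem.Str.startswith (pvKeyA r) (pre ++ ".")),
       rows.filter (fun r => !pvM pre (pvKeyA r))) := by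
  unfold collect_subtree
  rw [pv_foldl_partition]
  simp only [List.nil_append]
  have heq : (rows.filter (fun r => pvM pre (pvKeyA r))).filter (fun r => pvKeyA r == pre)
      = rows.filter (fun r => pvKeyA r == pre) := by
    rw [List.filter_filter]
    apply List.filter_congr
    intro x _
    cases h : (pvKeyA x == pre) <;> simp [h, pvM]
  have hne : (rows.filter (fun r => pvM pre (pvKeyA r))).filter (fun r => !(pvKeyA r == pre))
      = rows.filter (fun r => PySem.Str.startswith (pvKeyA r) (pre ++ ".")) := by
    rw [List.filter_filter]
    apply List.filter_congr
    intro x _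
    cases h : (pvKeyA x == pre) with
    | true =>
      have hxp : pvKeyA x = pre := by simpa using h
      rw [hxp]
      simp only [pvM, Bool.not_true, Bool.false_and]
      rw [hself]
    | false => simp [h, pvM]
  by_cases hz : rows.filter (fun r => pvM pre (pvKeyA r)) = []
  · rw [if_neg (not_not_intro hz), hz]
    have h0 : rows.filter (fun r => pvKeyA r == pre)
        ++ rows.filter (fun r => PySem.Str.startswith (pvKeyA r) (pre ++ ".")) = [] := by
      rw [← heq, ← hne, hz]
      rfl
    rw [h0]
  · rw [if_pos hz, heq, hne]

-- collapsing a bucket filter past an earlier disjoint partition step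
theorem pv_skip_eq (rows : List (List (String × String))) (q p : String)
    (h : ∀ s, (s == q) = true → pvM p s = false) :
    (rows.filter (fun r => !pvM p (pvKeyA r))).filter (fun r => pvKeyA r == q)
      = rows.filter (fun r => pvKeyA r == q) :=
  pv_filter_skip rows (fun s => s == q) (pvM p) h

theorem pv_skip_sw (rows : List (List (String × String))) (q p : String)
    (h : ∀ s, PySem.Str.startswith s (q ++ ".") = true → pvM p s = false) :
    (rows.filter (fun r => !pvM p (pvKeyA r))).filter (fun r => PySem.Str.startswith (pvKeyA r) (q ++ "."))
      = rows.filter (fun r => PySem.Str.startswith (pvKeyA r) (q ++ ".")) :=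
  pv_filter_skip rows (fun s => PySem.Str.startswith s (q ++ ".")) (pvM p) h

theorem pv_eq_m (q s : String) (h : (s == q) = true) : pvM q s = true := by
  simp [pvM, h]

theorem pv_sw_m (q s : String) (h : PySem.Str.startswith s (q ++ ".") = true) : pvM q s = true := by
  unfold pvM
  rw [h, Bool.or_true]

theorem reorder_spec_aux (rows : List (List (String × String))) :
    reorder_top_level_groups rows = reorder_top_level_groups_alt rows := by
  have hd : ∀ p q : String, (q == p) = false →
      PySem.Str.startswith q (p ++ ".") = false →
      PySem.Str.startswith p (q ++ ".") = false →
      ¬ (p.toList ++ ['.']) <+: (q.toList ++ ['.']) →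
      ¬ (q.toList ++ ['.']) <+: (p.toList ++ ['.']) →
      (∀ s, (s == q) = true → pvM p s = false) ∧
      (∀ s, PySem.Str.startswith s (q ++ ".") = true → pvM p s = false) := by
    intro p q h1 h2 h3 h4 h5
    exact ⟨fun s hs => pv_disj p q s h1 h2 h3 h4 h5 (pv_eq_m q s hs),
           fun s hs => pv_disj p q s h1 h2 h3 h4 h5 (pv_sw_m q s hs)⟩
  have d12 := hd "humanities" "social-science" (by decide) (by decide) (by decide) (by decide) (by decide)
  have d13 := hd "humanities" "formal-science" (by decide) (by decide) (by decide) (by decide) (by decide)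
  have d14 := hd "humanities" "natural-science" (by decide) (by decide) (by decide) (by decide) (by decide)
  have d23 := hd "social-science" "formal-science" (by decide) (by decide) (by decide) (by decide) (by decide)
  have d24 := hd "social-science" "natural-science" (by decide) (by decide) (by decide) (by decide) (by decide)
  have d34 := hd "formal-science" "natural-science" (by decide) (by decide) (by decide) (by decide) (by decide)
  unfold reorder_top_level_groups reorder_top_level_groups_alt
  simp only [List.foldl_cons, List.foldl_nil, List.any_cons, List.any_nil]
  rw [pv_collect "humanities" rows (by decide)]
  simp only []
  rw [pv_collect "social-science" _ (by decide)]
  simp only []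
  rw [pv_collect "formal-science" _ (by decide)]
  simp only []
  rw [pv_collect "natural-science" _ (by decide)]
  simp only []
  rw [pv_skip_eq _ _ _ d12.1, pv_skip_sw _ _ _ d12.2]
  rw [pv_skip_eq _ _ _ d23.1, pv_skip_sw _ _ _ d23.2,
      pv_skip_eq _ _ _ d13.1, pv_skip_sw _ _ _ d13.2]
  rw [pv_skip_eq _ _ _ d34.1, pv_skip_sw _ _ _ d34.2,
      pv_skip_eq _ _ _ d24.1, pv_skip_sw _ _ _ d24.2,
      pv_skip_eq _ _ _ d14.1, pv_skip_sw _ _ _ d14.2]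
  rw [List.filter_filter, List.filter_filter, List.filter_filter]
  have hrest : ∀ x : List (String × String), x ∈ rows →
      (!pvM "natural-science" (pvKeyA x) && !pvM "formal-science" (pvKeyA x) &&
        !pvM "social-science" (pvKeyA x) && !pvM "humanities" (pvKeyA x))
      = !(pvM "humanities" (pvKeyA x) || (pvM "social-science" (pvKeyA x) ||
          (pvM "formal-science" (pvKeyA x) || (pvM "natural-science" (pvKeyA x) || false)))) := by
    intro x _
    cases pvM "humanities" (pvKeyA x) <;> cases pvM "social-science" (pvKeyA x) <;>
      cases pvM "formal-science" (pvKeyA x) <;> cases pvM "natural-science" (pvKeyA x) <;> rfl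
  rw [List.filter_congr hrest]
  simp only [pvM, List.nil_append, List.append_assoc]

-- ===== VERDICT (by name: the statement is the Claim_ definition above) =====
theorem reorder_top_level_groups_spec : Claim_equal_reorder_top_level_groups := by
  intro rows _ _
  unfold Spec_reorder_top_level_groups
  exact reorder_spec_aux rows
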